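-- pv_equiv track=rewrite | github.com/harmslab/gpvolve | gpvolve/analysis/pathways.py | paths_that_contain
-- ===== SOURCE A (Python) =====
-- def paths_that_contain(paths, nodes, bool_and=False):
--     """Return paths that contain at least one or all of the nodes.
--
--     Parameters
--     ----------
--     paths : list.
--         list of paths where each path is a tuple of integers. Example : [(1,2,3), (1,3,4)]
--
--     nodes : list.
--         List of nodes that the paths are going to be searched for.
--
--     bool_and : bool.
--         If True, the sufficient requirement is that all nodes are in a path. If False, the sufficient
--         requirement is that at least one of the nodes is in a path.
--
--     Returns
--     -------
--     paths_ : list.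
--         list of paths that contain at least one or all of the nodes in 'nodes'.
--     """
--     paths_ = []
--
--     # Must contain all nodes.
--     if bool_and:
--         for path in paths:
--             contains = True
--             for node in nodes:
--                 if node in path:
--                     continue
--                 else:
--                     contains = False
--                     break
--             # If no breaks happen, all nodes are in path. (Sufficient requirement.)
--             if contains:
--                 paths_.append(path)
--
--     # Must contain at least one of the nodes.
--     elif not bool_and:
--         for path in paths:
--             for node in nodes:
--                 if node in path:
--                     paths_.append(path)
--                     break
--     return paths_
-- ===== SOURCE B (Python) =====
-- def paths_that_contain(paths, nodes, bool_and=False):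
--     # Build an inverted index once: node -> set of indices of paths containing it.
--     index = {}
--     for i, path in enumerate(paths):
--         for node in path:
--             index.setdefault(node, set()).add(i)
--     if bool_and:
--         result = set(range(len(paths)))
--         for node in nodes:
--             result = result & index.get(node, set())
--     else:
--         result = set()
--         for node in nodes:
--             result = result | index.get(node, set())
--     return [paths[i] for i in sorted(result)]
-- ===== Notes on version B (the rewrite author's own statement) =====
-- stated objective: alternative
-- what changed: Replaces the per-path scan over nodes by an inverted index (node -> set of path indices) built in one pass, then answers the query by set intersection/union of index entries and rebuilds the output from the sorted indices.
import Mathlib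
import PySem

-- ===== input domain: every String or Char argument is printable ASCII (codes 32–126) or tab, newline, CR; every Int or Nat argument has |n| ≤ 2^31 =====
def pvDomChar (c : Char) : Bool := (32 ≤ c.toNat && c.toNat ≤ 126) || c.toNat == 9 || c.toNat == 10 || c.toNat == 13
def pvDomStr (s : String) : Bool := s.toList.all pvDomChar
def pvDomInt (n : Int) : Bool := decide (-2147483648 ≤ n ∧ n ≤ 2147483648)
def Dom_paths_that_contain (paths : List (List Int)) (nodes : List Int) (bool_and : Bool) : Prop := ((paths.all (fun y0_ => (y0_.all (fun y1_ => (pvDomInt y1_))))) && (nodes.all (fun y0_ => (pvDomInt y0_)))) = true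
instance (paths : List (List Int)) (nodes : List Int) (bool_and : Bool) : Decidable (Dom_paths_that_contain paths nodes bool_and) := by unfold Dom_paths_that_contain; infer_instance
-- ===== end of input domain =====

-- B builds an inverted index node → set of path indices once and answers by set
-- intersection/union of index entries; A scans each path over the nodes. Same return value.

-- ===== PORT A =====
-- inner loop 'for node in nodes: if node in path: continue else: contains = False; break'
def ptcAllNodes (nodes path : List Int) : Bool :=
  match nodes with
  | [] => true
  | n :: ns => if path.contains n then ptcAllNodes ns path else false

-- inner loop 'for node in nodes: if node in path: paths_.append(path); break'
def ptcAnyNode (nodes path : List Int) : Bool :=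
  match nodes with
  | [] => false
  | n :: ns => if path.contains n then true else ptcAnyNode ns path

def paths_that_contain (paths : List (List Int)) (nodes : List Int) (bool_and : Bool) : List (List Int) :=
  if bool_and then
    paths.foldl (fun paths_ path => if ptcAllNodes nodes path then paths_ ++ [path] else paths_) []
  else
    paths.foldl (fun paths_ path => if ptcAnyNode nodes path then paths_ ++ [path] else paths_) []

-- ===== PORT B =====
-- index.setdefault(node, set()).add(i)  =  modify the entry at node (default empty set) by adding i
def ptcIndex (paths : List (List Int)) : PySem.Dict Int (PySem.Set Int) :=
  (PySem.List.enumerate paths).foldl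
    (fun d ip => ip.2.foldl (fun d node => d.modify node PySem.Set.empty (fun s => PySem.Set.add s ip.1)) d)
    PySem.Dict.empty

def paths_that_contain_alt (paths : List (List Int)) (nodes : List Int) (bool_and : Bool) : List (List Int) :=
  let index := ptcIndex paths
  let result : PySem.Set Int :=
    if bool_and then
      nodes.foldl (fun r node => PySem.Set.inter r (index.getD node PySem.Set.empty))
        (PySem.Set.ofList (PySem.List.pyRange 0 (paths.length : Int) 1))
    else
      nodes.foldl (fun r node => PySem.Set.union r (index.getD node PySem.Set.empty)) PySem.Set.empty
  -- every index in result is in range, so the default of pyGetD is never used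
  (PySem.List.sorted result (fun x => x) false).map (fun i => PySem.List.pyGetD paths i [])

-- ===== PRECONDITION & SPEC =====
def Spec_paths_that_contain (paths : List (List Int)) (nodes : List Int) (bool_and : Bool) (out : List (List Int)) : Prop := out = paths_that_contain_alt paths nodes bool_and
instance (paths : List (List Int)) (nodes : List Int) (bool_and : Bool) (out : List (List Int)) : Decidable (Spec_paths_that_contain paths nodes bool_and out) := by unfold Spec_paths_that_contain; infer_instance

-- ===== CLAIM (what is proved, stated in full; the proofs are below) =====
def Claim_equal_paths_that_contain : Prop := ∀ (paths : List (List Int)) (nodes : List Int) (bool_and : Bool), Dom_paths_that_contain paths nodes bool_and → Spec_paths_that_contain paths nodes bool_and (paths_that_contain paths nodes bool_and)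

-- ===== LEMMAS AND PROOFS =====

-- the predicate both programs decide for each path
def ptcPred (nodes : List Int) (bool_and : Bool) (p : List Int) : Bool :=
  if bool_and then nodes.all (fun n => p.contains n) else nodes.any (fun n => p.contains n)

theorem ptcAllNodes_eq (nodes path : List Int) :
    ptcAllNodes nodes path = nodes.all (fun n => path.contains n) := by
  induction nodes with
  | nil => rfl
  | cons n ns ih =>
      simp [ptcAllNodes, ih]

theorem ptcAnyNode_eq (nodes path : List Int) :
    ptcAnyNode nodes path = nodes.any (fun n => path.contains n) := by
  induction nodes with
  | nil => rfl
  | cons n ns ih =>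
      simp [ptcAnyNode, ih]

theorem A_eq_filter (paths : List (List Int)) (nodes : List Int) (b : Bool) :
    paths_that_contain paths nodes b = paths.filter (ptcPred nodes b) := by
  unfold paths_that_contain
  cases b
  · rw [if_neg (by simp), PySem.List.foldl_append_if_eq_filter (fun path => ptcAnyNode nodes path)]
    simp only [ptcAnyNode_eq, List.nil_append]
    rfl
  · rw [if_pos rfl, PySem.List.foldl_append_if_eq_filter (fun path => ptcAllNodes nodes path)]
    simp only [ptcAllNodes_eq, List.nil_append]
    rfl

-- one path's inner loop: which indices end up in the entry at n
theorem mem_getD_inner (p : List Int) (j : Int) (d : PySem.Dict Int (PySem.Set Int)) (n i : Int) :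
    i ∈ (p.foldl (fun d node => d.modify node PySem.Set.empty (fun s => PySem.Set.add s j)) d).getD n PySem.Set.empty ↔
      i ∈ d.getD n PySem.Set.empty ∨ (n ∈ p ∧ i = j) := by
  induction p generalizing d with
  | nil => simp
  | cons node rest ih =>
      simp only [List.foldl_cons, ih, PySem.Dict.getD_modify]
      by_cases h : n = node
      · simp [h, PySem.Set.mem_add]; tauto
      · simp [h]

-- the whole index-building loop
theorem mem_getD_index_gen (paths : List (List Int)) (s : Int)
    (d : PySem.Dict Int (PySem.Set Int)) (n i : Int) :
    i ∈ ((PySem.List.enumerate paths s).foldl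
          (fun d ip => ip.2.foldl (fun d node => d.modify node PySem.Set.empty (fun s => PySem.Set.add s ip.1)) d)
          d).getD n PySem.Set.empty ↔
      i ∈ d.getD n PySem.Set.empty ∨ ∃ k : Nat, ∃ _ : k < paths.length, i = s + k ∧ n ∈ paths[k] := by
  induction paths generalizing s d with
  | nil => simp [PySem.List.enumerate]
  | cons p rest ih =>
      rw [PySem.List.enumerate_cons]
      simp only [List.foldl_cons, ih, mem_getD_inner]
      constructor
      · rintro ((h | ⟨hn, hi⟩) | ⟨k, hk, hi, hn⟩)
        · exact Or.inl h
        · exact Or.inr ⟨0, by simp, by omega, by simpa using hn⟩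
        · exact Or.inr ⟨k + 1, by simpa using hk, by omega, by simpa using hn⟩
      · rintro (h | ⟨k, hk, hi, hn⟩)
        · exact Or.inl (Or.inl h)
        · cases k with
          | zero => exact Or.inl (Or.inr ⟨by simpa using hn, by omega⟩)
          | succ k => exact Or.inr ⟨k, by simpa using hk, by omega, by simpa using hn⟩

theorem mem_getD_index (paths : List (List Int)) (n i : Int) :
    i ∈ (ptcIndex paths).getD n PySem.Set.empty ↔
      ∃ k : Nat, ∃ _ : k < paths.length, i = k ∧ n ∈ paths[k] := by
  have := mem_getD_index_gen paths 0 PySem.Dict.empty n i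
  simpa [ptcIndex, PySem.Dict.getD_empty] using this

theorem mem_foldl_union (nodes : List Int) (g : Int → PySem.Set Int) (r : PySem.Set Int) (i : Int) :
    i ∈ nodes.foldl (fun r node => PySem.Set.union r (g node)) r ↔
      i ∈ r ∨ ∃ n ∈ nodes, i ∈ g n := by
  induction nodes generalizing r with
  | nil => simp
  | cons n ns ih => simp [ih, PySem.Set.mem_union]; tauto

theorem mem_foldl_inter (nodes : List Int) (g : Int → PySem.Set Int) (r : PySem.Set Int) (i : Int) :
    i ∈ nodes.foldl (fun r node => PySem.Set.inter r (g node)) r ↔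
      i ∈ r ∧ ∀ n ∈ nodes, i ∈ g n := by
  induction nodes generalizing r with
  | nil => simp
  | cons n ns ih => simp [ih, PySem.Set.mem_inter]; tauto

theorem nodup_foldl_union (nodes : List Int) (g : Int → PySem.Set Int) (r : PySem.Set Int)
    (h : r.Nodup) : (nodes.foldl (fun r node => PySem.Set.union r (g node)) r).Nodup := by
  induction nodes generalizing r with
  | nil => exact h
  | cons n ns ih => exact ih _ (PySem.Set.nodup_union _ _ h)

theorem nodup_foldl_inter (nodes : List Int) (g : Int → PySem.Set Int) (r : PySem.Set Int)
    (h : r.Nodup) : (nodes.foldl (fun r node => PySem.Set.inter r (g node)) r).Nodup := by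
  induction nodes generalizing r with
  | nil => exact h
  | cons n ns ih => exact ih _ (PySem.Set.nodup_inter _ _ h)

-- the set of indices B computes, named for the proofs
def ptcResult (paths : List (List Int)) (nodes : List Int) (b : Bool) : PySem.Set Int :=
  if b then
    nodes.foldl (fun r node => PySem.Set.inter r ((ptcIndex paths).getD node PySem.Set.empty))
      (PySem.Set.ofList (PySem.List.pyRange 0 (paths.length : Int) 1))
  else
    nodes.foldl (fun r node => PySem.Set.union r ((ptcIndex paths).getD node PySem.Set.empty)) PySem.Set.empty

theorem mem_getD_index' (paths : List (List Int)) (n i : Int) :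
    i ∈ (ptcIndex paths).getD n PySem.Set.empty ↔
      (0 ≤ i ∧ i < (paths.length : Int)) ∧ n ∈ PySem.List.pyGetD paths i [] := by
  rw [mem_getD_index]
  constructor
  · rintro ⟨k, hk, rfl, hn⟩
    refine ⟨⟨by omega, by exact_mod_cast hk⟩, ?_⟩
    rw [PySem.List.pyGetD_eq_getElem _ _ (by omega) (by exact_mod_cast hk)]
    simpa using hn
  · rintro ⟨⟨h0, hl⟩, hn⟩
    refine ⟨i.toNat, by omega, by omega, ?_⟩
    rwa [PySem.List.pyGetD_eq_getElem _ _ h0 hl] at hn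

theorem mem_ptcResult (paths : List (List Int)) (nodes : List Int) (b : Bool) (i : Int) :
    i ∈ ptcResult paths nodes b ↔
      (0 ≤ i ∧ i < (paths.length : Int)) ∧
        ptcPred nodes b (PySem.List.pyGetD paths i []) = true := by
  cases b
  · rw [ptcResult, if_neg (by simp), mem_foldl_union]
    simp only [mem_getD_index']
    simp [ptcPred, List.any_eq_true]
    tauto
  · rw [ptcResult, if_pos rfl, mem_foldl_inter, PySem.Set.mem_ofList]
    simp only [mem_getD_index', PySem.List.mem_pyRange_one]
    simp [ptcPred]
    intro h0 h1
    exact ⟨fun hall n hn => (hall n hn).2, fun hall n hn => ⟨⟨h0, h1⟩, hall n hn⟩⟩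

theorem nodup_ptcResult (paths : List (List Int)) (nodes : List Int) (b : Bool) :
    (ptcResult paths nodes b).Nodup := by
  cases b
  · exact nodup_foldl_union _ _ _ List.nodup_nil
  · exact nodup_foldl_inter _ _ _ (PySem.Set.nodup_ofList _)

theorem B_eq_filter (paths : List (List Int)) (nodes : List Int) (b : Bool) :
    paths_that_contain_alt paths nodes b = paths.filter (ptcPred nodes b) := by
  have hrfl : paths_that_contain_alt paths nodes b =
      (PySem.List.sorted (ptcResult paths nodes b) (fun x => x) false).map
        (fun i => PySem.List.pyGetD paths i []) := by
    cases b <;> rfl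
  have hnodupc :
      ((PySem.List.pyRange 0 (paths.length : Int) 1).filter
        (fun j => ptcPred nodes b (PySem.List.pyGetD paths j []))).Nodup :=
    (PySem.List.nodup_pyRange_one 0 _).filter _
  have hperm :
      ((PySem.List.pyRange 0 (paths.length : Int) 1).filter
        (fun j => ptcPred nodes b (PySem.List.pyGetD paths j []))).Perm
        (ptcResult paths nodes b) := by
    rw [List.perm_ext_iff_of_nodup hnodupc (nodup_ptcResult paths nodes b)]
    intro a
    rw [mem_ptcResult, List.mem_filter, PySem.List.mem_pyRange_one]
  have hpw :
      ((PySem.List.pyRange 0 (paths.length : Int) 1).filter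
        (fun j => ptcPred nodes b (PySem.List.pyGetD paths j []))).Pairwise (· < ·) :=
    (PySem.List.pairwise_lt_pyRange_one 0 _).filter _
  rw [hrfl, PySem.List.sorted_eq_of_perm_of_pairwise_lt _ _ _ hperm hpw]
  have hcomp :
      (PySem.List.pyRange 0 (paths.length : Int) 1).filter
          (fun j => ptcPred nodes b (PySem.List.pyGetD paths j [])) =
        (PySem.List.pyRange 0 (paths.length : Int) 1).filter
          (ptcPred nodes b ∘ fun i => PySem.List.pyGetD paths i []) := rfl
  rw [hcomp, ← List.filter_map, PySem.List.map_pyGetD_pyRange_zero']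

-- ===== VERDICT (by name: the statement is the Claim_ definition above) =====
theorem paths_that_contain_spec : Claim_equal_paths_that_contain := by
  intro paths nodes bool_and _
  unfold Spec_paths_that_contain
  rw [A_eq_filter, B_eq_filter]
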